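-- pv_equiv track=rewrite | github.com/blegloannec/CodeProblems | Kattis/wordcloud.py | cloud
-- ===== SOURCE A (Python) =====
-- ceil_div = lambda p,q: (p+q-1)//q
--
-- P = lambda cmax: lambda c: 8 + ceil_div(40*(c-4), cmax-4)
--
-- def cloud(Words, width, sep=10):
--     # NB: words already given in order
--     cmax = max(c for _,c in Words)
--     Pts = P(cmax)
--     Cloud = []
--     l = width
--     for (word,c) in Words:
--         h = Pts(c)
--         w = ceil_div(9*len(word)*h, 16)
--         if l+sep+w > width:
--             Cloud.append([(w,h, word)])
--             l = w
--         else: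
--             Cloud[-1].append((w,h, word))
--             l += sep+w
--     height = sum(max(h for _,h,_ in L) for L in Cloud)
--     return (width,height, Cloud)
-- ===== SOURCE B (Python) =====
-- def cloud(Words, width, sep=10):
--     # line-by-line packing: the outer loop peels off one whole line per
--     # iteration (maximal fitting prefix), fusing the height sum into it
--     cmax = max(c for _, c in Words)
--     items = []
--     for word, c in Words:
--         h = 8 + (40 * (c - 4) + cmax - 5) // (cmax - 4)
--         w = (9 * len(word) * h + 15) // 16
--         items.append((w, h, word))
--     lines = []
--     height = 0
--     i = 0
--     n = len(items)
--     while i < n: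
--         l = items[i][0]
--         j = i + 1
--         while j < n and l + sep + items[j][0] <= width:
--             l += sep + items[j][0]
--             j += 1
--         line = items[i:j]
--         lines.append(line)
--         height += max(h for _, h, _ in line)
--         i = j
--     return (width, height, lines)
-- ===== Notes on version B (the rewrite author's own statement) =====
-- stated objective: alternative
-- what changed: B packs line-by-line: an outer loop peels off the maximal fitting prefix as one whole line (inner fitting scan, then slice) and adds that line's max height immediately, instead of A's flat per-word loop that mutates the last line of Cloud and a separate second sum-of-max pass over all lines.
-- outside the precondition, e.g. on cloud([], 100, 10): A raises ValueError, B raises ValueError; on cloud([('a', 4)], 100, 10): A raises ZeroDivisionError, B raises ZeroDivisionError; on cloud([('a', 10)], 100, -30): A raises IndexError, B returns (100, 48, [[(27, 48, 'a')]])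
import Mathlib
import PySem

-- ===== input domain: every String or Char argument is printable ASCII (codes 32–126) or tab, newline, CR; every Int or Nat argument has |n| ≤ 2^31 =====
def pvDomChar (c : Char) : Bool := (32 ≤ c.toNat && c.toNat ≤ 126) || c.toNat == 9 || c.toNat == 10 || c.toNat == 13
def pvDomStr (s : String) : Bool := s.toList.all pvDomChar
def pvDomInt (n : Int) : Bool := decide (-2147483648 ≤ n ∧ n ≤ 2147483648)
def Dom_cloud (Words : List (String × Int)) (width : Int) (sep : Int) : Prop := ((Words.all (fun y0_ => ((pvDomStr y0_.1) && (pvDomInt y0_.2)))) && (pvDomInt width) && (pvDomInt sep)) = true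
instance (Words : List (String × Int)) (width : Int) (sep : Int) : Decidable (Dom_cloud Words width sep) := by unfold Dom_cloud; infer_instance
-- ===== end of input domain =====

-- B packs line-by-line (an outer loop peels off the maximal fitting prefix as one whole
-- line, adding its max height immediately) instead of A's flat per-word loop that mutates
-- Cloud's last line plus a second sum-of-max pass; objective: alternative.

-- ===== PORT A =====
-- ceil_div = lambda p,q: (p+q-1)//q
def ceilDiv (p q : Int) : Int := PySem.Int.floordiv (p + q - 1) q

-- P = lambda cmax: lambda c: 8 + ceil_div(40*(c-4), cmax-4)
def ptsA (cmax c : Int) : Int := 8 + ceilDiv (40 * (c - 4)) (cmax - 4)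

-- max(c for _,c in Words): Python's running-max loop; raises on [] (excluded by Pre_, default 0 here)
def cmaxW (Words : List (String × Int)) : Int :=
  match Words.map Prod.snd with
  | [] => 0
  | x :: t => t.foldl max x

-- Cloud[-1].append(x); Python raises IndexError on empty Cloud (excluded by Pre_, returns [] here)
def appendLast (Cloud : List (List (Int × Int × String))) (x : Int × Int × String) : List (List (Int × Int × String)) :=
  match Cloud with
  | [] => []
  | [L] => [L ++ [x]]
  | L :: M :: rest => L :: appendLast (M :: rest) x

-- max(h for _,h,_ in L): Python's running-max loop (L is never empty in A's lines)
def lineMaxA (L : List (Int × Int × String)) : Int :=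
  match L.map (fun t => t.2.1) with
  | [] => 0
  | x :: t => t.foldl max x

-- sum(max(h for _,h,_ in L) for L in Cloud)
def sumLM (Cloud : List (List (Int × Int × String))) : Int :=
  Cloud.foldl (fun acc L => acc + lineMaxA L) 0

-- the body of A's for-loop, state (Cloud, l)
def stepA (cmax width sep : Int) (st : List (List (Int × Int × String)) × Int)
    (wc : String × Int) : List (List (Int × Int × String)) × Int :=
  let h := ptsA cmax wc.2
  let w := ceilDiv (9 * PySem.Str.len wc.1 * h) 16
  if st.2 + sep + w > width then (st.1 ++ [[(w, h, wc.1)]], w)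
  else (appendLast st.1 (w, h, wc.1), st.2 + sep + w)

def cloud (Words : List (String × Int)) (width : Int) (sep : Int) : Int × Int × (List (List (Int × Int × String))) :=
  let cmax := cmaxW Words
  let st := Words.foldl (stepA cmax width sep) ([], width)
  (width, sumLM st.1, st.1)

-- ===== PORT B =====
-- max(h for _,h,_ in line)
def lineMaxB (L : List (Int × Int × String)) : Int :=
  match L.map (fun t => t.2.1) with
  | [] => 0
  | x :: t => t.foldl max x

-- the items.append loop body: (w, h, word) for one word
def dimsB (cmax : Int) (wc : String × Int) : Int × Int × String :=
  let h := 8 + PySem.Int.floordiv (40 * (wc.2 - 4) + cmax - 5) (cmax - 4)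
  let w := PySem.Int.floordiv (9 * PySem.Str.len wc.1 * h + 15) 16
  (w, h, wc.1)

-- the inner while loop: consume items while they still fit on the current line;
-- returns (consumed items, final l, remaining items)
def splitLineB (width sep l : Int) : List (Int × Int × String) → List (Int × Int × String) × Int × List (Int × Int × String)
  | [] => ([], l, [])
  | x :: t =>
    if l + sep + x.1 ≤ width then
      let r := splitLineB width sep (l + sep + x.1) t
      (x :: r.1, r.2)
    else ([], l, x :: t)

-- cited by packB's decreasing_by: the remainder is no longer than the input
theorem splitLineB_rest_le (width sep l : Int) (t : List (Int × Int × String)) :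
    (splitLineB width sep l t).2.2.length ≤ t.length := by
  induction t generalizing l with
  | nil => simp [splitLineB]
  | cons x t ih =>
    simp only [splitLineB]
    split
    · exact le_trans (ih _) (Nat.le_succ _)
    · exact le_refl _

-- the outer while loop: one iteration per line (line = x plus the fitting prefix of t)
def packB (width sep : Int) (x : Int × Int × String) (t : List (Int × Int × String)) :
    List (List (Int × Int × String)) × Int :=
  let s := splitLineB width sep x.1 t
  match h : s.2.2 with
  | [] => ([x :: s.1], lineMaxB (x :: s.1))
  | y :: r =>
    let p := packB width sep y r
    ((x :: s.1) :: p.1, lineMaxB (x :: s.1) + p.2)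
termination_by t.length
decreasing_by
  have hle := splitLineB_rest_le width sep x.1 t
  rw [h] at hle
  simpa using Nat.lt_of_lt_of_le (Nat.lt_succ_self _) hle

def cloud_alt (Words : List (String × Int)) (width : Int) (sep : Int) : Int × Int × (List (List (Int × Int × String))) :=
  let cmax := cmaxW Words
  match Words.map (dimsB cmax) with
  | [] => (width, 0, [])
  | x :: t =>
    let p := packB width sep x t
    (width, p.2, p.1)

-- ===== PRECONDITION & SPEC =====
-- width of the first word (A's first loop iteration), used only to state Pre_
def firstW (Words : List (String × Int)) : Int :=
  match Words with
  | [] => 0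
  | (s, c) :: _ => ceilDiv (9 * PySem.Str.len s * ptsA (cmaxW Words) c) 16

-- Pre_ excludes exactly the inputs on which Python A raises: empty Words (ValueError from max),
-- cmax = 4 (ZeroDivisionError), and sep + firstW ≤ 0 (the first word would "continue" the
-- nonexistent current line: IndexError on Cloud[-1]).
def Pre_cloud (Words : List (String × Int)) (width : Int) (sep : Int) : Prop :=
  Words ≠ [] ∧ cmaxW Words ≠ 4 ∧ 0 < sep + firstW Words
instance (Words : List (String × Int)) (width : Int) (sep : Int) : Decidable (Pre_cloud Words width sep) := by unfold Pre_cloud; infer_instance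

def pvWitness_cloud : (List (String × Int)) × Int × Int := ([("hello", 10), ("yo", 8)], 100, 10)

def Spec_cloud (Words : List (String × Int)) (width : Int) (sep : Int) (out : Int × Int × (List (List (Int × Int × String)))) : Prop := out = cloud_alt Words width sep
instance (Words : List (String × Int)) (width : Int) (sep : Int) (out : Int × Int × (List (List (Int × Int × String)))) : Decidable (Spec_cloud Words width sep out) := by unfold Spec_cloud; infer_instance

-- ===== CLAIM (what is proved, stated in full; the proofs are below) =====
def Claim_equal_cloud : Prop := ∀ (Words : List (String × Int)) (width : Int) (sep : Int), Dom_cloud Words width sep → Pre_cloud Words width sep → Spec_cloud Words width sep (cloud Words width sep)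

-- ===== LEMMAS AND PROOFS =====

-- A's loop body, re-expressed over a precomputed item (w, h, word)
def stepI (width sep : Int) (st : List (List (Int × Int × String)) × Int)
    (it : Int × Int × String) : List (List (Int × Int × String)) × Int :=
  if st.2 + sep + it.1 > width then (st.1 ++ [[it]], it.1)
  else (appendLast st.1 it, st.2 + sep + it.1)

lemma hB_eq (cmax c : Int) :
    8 + PySem.Int.floordiv (40 * (c - 4) + cmax - 5) (cmax - 4) = ptsA cmax c := by
  unfold ptsA ceilDiv; congr 1; congr 1; ring

lemma wB_eq (n h : Int) :
    PySem.Int.floordiv (9 * n * h + 15) 16 = ceilDiv (9 * n * h) 16 := by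
  unfold ceilDiv; congr 1; ring

lemma lineMaxB_eq (L : List (Int × Int × String)) : lineMaxB L = lineMaxA L := rfl

lemma stepA_eq_stepI (cmax width sep : Int) (st : List (List (Int × Int × String)) × Int)
    (wc : String × Int) : stepA cmax width sep st wc = stepI width sep st (dimsB cmax wc) := by
  simp only [stepA, stepI, dimsB, hB_eq, wB_eq]

lemma appendLast_snoc (lines : List (List (Int × Int × String)))
    (cur : List (Int × Int × String)) (x : Int × Int × String) :
    appendLast (lines ++ [cur]) x = lines ++ [cur ++ [x]] := by
  induction lines with
  | nil => rfl
  | cons L ls ih =>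
    cases ls with
    | nil => simp [appendLast]
    | cons M ms =>
      simp only [List.cons_append, appendLast]
      rw [← List.cons_append, ih]
      simp

lemma sumLM_append (xs : List (List (Int × Int × String))) (c : List (Int × Int × String)) :
    sumLM (xs ++ [c]) = sumLM xs + lineMaxA c := by
  unfold sumLM; rw [List.foldl_append]; rfl

-- A's fold over a run of fitting items just extends the last line, exactly splitLineB's prefix
lemma foldI_split (width sep : Int) (t : List (Int × Int × String)) :
    ∀ (lines : List (List (Int × Int × String))) (cur : List (Int × Int × String)) (l : Int),
      t.foldl (stepI width sep) (lines ++ [cur], l)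
        = (splitLineB width sep l t).2.2.foldl (stepI width sep)
            (lines ++ [cur ++ (splitLineB width sep l t).1], (splitLineB width sep l t).2.1) := by
  induction t with
  | nil => intro lines cur l; simp [splitLineB]
  | cons x t ih =>
    intro lines cur l
    simp only [splitLineB, List.foldl_cons]
    by_cases h : l + sep + x.1 ≤ width
    · rw [if_pos h]
      have hstep : stepI width sep (lines ++ [cur], l) x
          = (lines ++ [cur ++ [x]], l + sep + x.1) := by
        simp only [stepI]
        rw [if_neg (by omega), appendLast_snoc]
      rw [hstep, ih lines (cur ++ [x]) (l + sep + x.1)]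
      simp
    · rw [if_neg h]
      simp

-- when splitLineB stops early, the next item breaks the line
lemma splitLineB_break (width sep : Int) (t : List (Int × Int × String)) :
    ∀ (l : Int) (y : Int × Int × String) (r : List (Int × Int × String)),
      (splitLineB width sep l t).2.2 = y :: r →
      width < (splitLineB width sep l t).2.1 + sep + y.1 := by
  induction t with
  | nil => intro l y r h; simp [splitLineB] at h
  | cons x t ih =>
    intro l y r h
    simp only [splitLineB] at h ⊢
    by_cases hc : l + sep + x.1 ≤ width
    · rw [if_pos hc] at h ⊢; exact ih _ y r h
    · rw [if_neg hc] at h ⊢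
      have h' : x :: t = y :: r := h
      injection h' with he _
      subst he
      show width < l + sep + x.1
      omega

-- main invariant: starting a new line with x, A's remaining fold produces exactly
-- packB's lines appended to the accumulator, with matching height sum
lemma fold_eq_pack (width sep : Int) :
    ∀ (n : ℕ) (t : List (Int × Int × String)), t.length ≤ n →
    ∀ (x : Int × Int × String) (lines : List (List (Int × Int × String))) (l : Int),
      width < l + sep + x.1 →
      (((x :: t).foldl (stepI width sep) (lines, l)).1 = lines ++ (packB width sep x t).1
       ∧ sumLM (((x :: t).foldl (stepI width sep) (lines, l)).1)
           = sumLM lines + (packB width sep x t).2) := by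
  intro n
  induction n with
  | zero =>
    intro t ht x lines l hbr
    cases t with
    | cons a b => simp at ht
    | nil =>
      have hstep : stepI width sep (lines, l) x = (lines ++ [[x]], x.1) := by
        simp only [stepI]; rw [if_pos (by omega)]
      rw [packB]
      simp only [List.foldl_cons, List.foldl_nil, hstep, splitLineB]
      constructor
      · simp
      · rw [sumLM_append]; rfl
  | succ n ih =>
    intro t ht x lines l hbr
    have hstep : stepI width sep (lines, l) x = (lines ++ [[x]], x.1) := by
      simp only [stepI]; rw [if_pos (by omega)]
    rw [List.foldl_cons, hstep, foldI_split width sep t lines [x] x.1]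
    rw [packB]
    cases hb : (splitLineB width sep x.1 t).2.2 with
    | nil =>
      simp only [List.foldl_nil, List.singleton_append]
      constructor
      · simp
      · rw [sumLM_append, lineMaxB_eq]
    | cons y r =>
      have hbreak := splitLineB_break width sep t x.1 y r hb
      have hrle : r.length ≤ n := by
        have := splitLineB_rest_le width sep x.1 t
        rw [hb] at this
        simp only [List.length_cons] at this
        omega
      obtain ⟨h1, h2⟩ := ih r hrle y (lines ++ [[x] ++ (splitLineB width sep x.1 t).1])
        (splitLineB width sep x.1 t).2.1 hbreak
      simp only [List.singleton_append] at h1 h2 ⊢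
      constructor
      · rw [h1]; simp
      · rw [h2, sumLM_append, lineMaxB_eq]; ring

-- ===== VERDICT (by name: the statement is the Claim_ definition above) =====
theorem cloud_spec : Claim_equal_cloud := by
  intro Words width sep _hdom hpre
  obtain ⟨hne, _hc4, hsep⟩ := hpre
  unfold Spec_cloud
  cases Words with
  | nil => exact absurd rfl hne
  | cons wc ws =>
    obtain ⟨s0, c0⟩ := wc
    have hfun : stepA (cmaxW ((s0, c0) :: ws)) width sep
        = fun st wc => stepI width sep st (dimsB (cmaxW ((s0, c0) :: ws)) wc) :=
      funext fun st => funext fun wc => stepA_eq_stepI _ _ _ _ _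
    have hmapfold : List.foldl (stepA (cmaxW ((s0, c0) :: ws)) width sep) ([], width) ((s0, c0) :: ws)
        = List.foldl (stepI width sep) ([], width) (((s0, c0) :: ws).map (dimsB (cmaxW ((s0, c0) :: ws)))) := by
      rw [List.foldl_map, hfun]
    have hA : cloud ((s0, c0) :: ws) width sep
        = (width,
           sumLM (List.foldl (stepA (cmaxW ((s0, c0) :: ws)) width sep) ([], width) ((s0, c0) :: ws)).1,
           (List.foldl (stepA (cmaxW ((s0, c0) :: ws)) width sep) ([], width) ((s0, c0) :: ws)).1) := rfl
    have hB : cloud_alt ((s0, c0) :: ws) width sep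
        = (width,
           (packB width sep (dimsB (cmaxW ((s0, c0) :: ws)) (s0, c0)) (ws.map (dimsB (cmaxW ((s0, c0) :: ws))))).2,
           (packB width sep (dimsB (cmaxW ((s0, c0) :: ws)) (s0, c0)) (ws.map (dimsB (cmaxW ((s0, c0) :: ws))))).1) := rfl
    rw [hA, hB, hmapfold]
    simp only [List.map_cons]
    have hfw : (dimsB (cmaxW ((s0, c0) :: ws)) (s0, c0)).1 = firstW ((s0, c0) :: ws) := by
      simp only [dimsB, firstW, hB_eq, wB_eq]
    have hbr : width < width + sep + (dimsB (cmaxW ((s0, c0) :: ws)) (s0, c0)).1 := by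
      rw [hfw]; omega
    obtain ⟨h1, h2⟩ := fold_eq_pack width sep (ws.map (dimsB (cmaxW ((s0, c0) :: ws)))).length
      (ws.map (dimsB (cmaxW ((s0, c0) :: ws)))) (le_refl _)
      (dimsB (cmaxW ((s0, c0) :: ws)) (s0, c0)) [] width hbr
    simp only [List.nil_append] at h1 h2
    rw [h2, h1]
    simp [sumLM]
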